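-- pv_equiv track=rewrite | github.com/tac-tics/ploverize | outlines_extended.py | split_stroke
-- ===== SOURCE A (Python) =====
-- def stroke_to_keys(stroke):
--     keys = []
--     i = 0
--     while i < len(stroke):
--         key = stroke[i]
--         i += 1
--         while i < len(stroke) and stroke[i].upper() != stroke[i]:
--             key += stroke[i]
--             i += 1
--         keys.append(key)
--
--     return keys
--
-- def split_stroke(stroke):
--     keys = stroke_to_keys(stroke)
--     mode = 'left'
--
--     middles = ['A', 'O', 'I', 'Ee', 'E', 'U', '*', 'Aw', 'Ow', 'Eye', 'Oo', 'Ea', 'Oh']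
--     left = []
--     middle = []
--     right = []
--
--     for key in keys:
--         if mode == 'left':
--             if key == '-':
--                 mode = 'right'
--             elif key in middles:
--                 mode = 'middle'
--             else:
--                 left.append(key)
--
--         if mode == 'middle':
--             if key not in middles:
--                 mode = 'right'
--             else:
--                 middle.append(key)
--
--         if mode == 'right':
--             right.append(key)
--
--     if len(middle) == 0 and len(right) > 0:
--         # trim leading '-'
--         right = right[1:]
--
--     return ''.join(left), ''.join(middle), ''.join(right)
-- ===== SOURCE B (Python) =====
-- MIDDLES = {'A', 'O', 'I', 'Ee', 'E', 'U', '*', 'Aw', 'Ow', 'Eye', 'Oo', 'Ea', 'Oh'}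
--
-- def stroke_to_keys(stroke):
--     keys = []
--     i = 0
--     while i < len(stroke):
--         key = stroke[i]
--         i += 1
--         while i < len(stroke) and stroke[i].upper() != stroke[i]:
--             key += stroke[i]
--             i += 1
--         keys.append(key)
--     return keys
--
-- def split_stroke(stroke):
--     keys = stroke_to_keys(stroke)
--     n = len(keys)
--     i = 0
--     while i < n and keys[i] != '-' and keys[i] not in MIDDLES:
--         i += 1
--     left = ''.join(keys[:i])
--     if i == n:
--         return left, '', ''
--     if keys[i] == '-':
--         return left, '', ''.join(keys[i + 1:])
--     j = i
--     while j < n and keys[j] in MIDDLES: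
--         j += 1
--     return left, ''.join(keys[i:j]), ''.join(keys[j:])
-- ===== Notes on version B (the rewrite author's own statement) =====
-- stated objective: alternative
-- what changed: Replaced A's per-key three-state (left/middle/right) state-machine fold with two boundary scans over the token list: find where the left bank ends, branch on '-' vs vowel, then span the vowel run; the mode variable and the post-hoc leading-'-' trim disappear.
import Mathlib
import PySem

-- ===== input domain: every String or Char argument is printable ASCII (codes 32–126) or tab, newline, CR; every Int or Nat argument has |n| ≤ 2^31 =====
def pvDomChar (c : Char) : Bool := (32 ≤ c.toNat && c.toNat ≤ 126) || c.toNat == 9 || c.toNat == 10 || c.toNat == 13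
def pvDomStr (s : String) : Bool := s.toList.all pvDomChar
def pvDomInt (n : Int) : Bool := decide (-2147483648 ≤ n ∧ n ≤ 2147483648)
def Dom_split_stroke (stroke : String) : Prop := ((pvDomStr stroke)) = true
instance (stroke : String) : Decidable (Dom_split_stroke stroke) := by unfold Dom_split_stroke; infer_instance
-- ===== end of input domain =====

-- B replaces A's three-mode state machine fold with two boundary scans over the token
-- list (find where the left bank ends, then where the vowel run ends); objective: alternative.

-- ===== PORT A =====
-- shared helper: Python stroke_to_keys (identical code in Source A and Source B).
-- `c.toUpper ≠ c` ports Python's `stroke[i].upper() != stroke[i]`; exact on the ASCII domain.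
def spanLower : List Char → List Char × List Char
  | [] => ([], [])
  | c :: cs =>
    if c.toUpper ≠ c then
      let p := spanLower cs
      (c :: p.1, p.2)
    else ([], c :: cs)

theorem spanLower_snd_length : ∀ cs : List Char, (spanLower cs).2.length ≤ cs.length := by
  intro cs
  induction cs with
  | nil => simp [spanLower]
  | cons c cs ih =>
    by_cases h : c.toUpper ≠ c
    · simpa [spanLower, h] using Nat.le_succ_of_le ih
    · simp [spanLower, h]

def strokeToKeys : List Char → List String
  | [] => []
  | c :: cs =>
    let p := spanLower cs
    String.ofList (c :: p.1) :: strokeToKeys p.2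
termination_by l => l.length
decreasing_by
  simp only [List.length_cons]
  exact Nat.lt_succ_of_le (spanLower_snd_length cs)

def middlesA : List String :=
  ["A", "O", "I", "Ee", "E", "U", "*", "Aw", "Ow", "Eye", "Oo", "Ea", "Oh"]

inductive PvMode | left | middle | right
deriving DecidableEq, Repr

-- one iteration of A's for-loop: the three sequential `if` blocks, in order
def stepA (st : PvMode × List String × List String × List String) (key : String) :
    PvMode × List String × List String × List String :=
  let mode := st.1
  let l := st.2.1
  let m := st.2.2.1
  let r := st.2.2.2
  let s1 : PvMode × List String :=
    if mode = .left then
      if key = "-" then (.right, l)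
      else if key ∈ middlesA then (.middle, l)
      else (.left, l ++ [key])
    else (mode, l)
  let s2 : PvMode × List String :=
    if s1.1 = .middle then
      if key ∉ middlesA then (.right, m)
      else (.middle, m ++ [key])
    else (s1.1, m)
  let r' := if s2.1 = .right then r ++ [key] else r
  (s2.1, s1.2, s2.2, r')

def split_stroke (stroke : String) : String × String × String :=
  let keys := strokeToKeys stroke.toList
  let st := keys.foldl stepA (.left, [], [], [])
  let l := st.2.1
  let m := st.2.2.1
  let r := st.2.2.2
  -- trim leading '-' : right = right[1:] (List.drop 1 = Python slice [1:])
  let r' := if m.length = 0 ∧ r.length > 0 then r.drop 1 else r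
  (String.join l, String.join m, String.join r')

-- ===== PORT B =====
-- B's first while loop: advance past keys that are neither '-' nor middles
def splitLeftB : List String → List String × List String
  | [] => ([], [])
  | k :: ks =>
    if k = "-" ∨ k ∈ middlesA then ([], k :: ks)
    else
      let p := splitLeftB ks
      (k :: p.1, p.2)

-- B's second while loop: span of middle keys
def spanMiddleB : List String → List String × List String
  | [] => ([], [])
  | k :: ks =>
    if k ∈ middlesA then
      let p := spanMiddleB ks
      (k :: p.1, p.2)
    else ([], k :: ks)

def split_stroke_alt (stroke : String) : String × String × String :=
  let keys := strokeToKeys stroke.toList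
  let p := splitLeftB keys
  let left := String.join p.1
  match p.2 with
  | [] => (left, "", "")
  | k :: rest =>
    if k = "-" then (left, "", String.join rest)
    else
      let q := spanMiddleB (k :: rest)
      (left, String.join q.1, String.join q.2)

-- ===== PRECONDITION & SPEC =====
def Spec_split_stroke (stroke : String) (out : String × String × String) : Prop := out = split_stroke_alt stroke
instance (stroke : String) (out : String × String × String) : Decidable (Spec_split_stroke stroke out) := by unfold Spec_split_stroke; infer_instance

-- ===== CLAIM (what is proved, stated in full; the proofs are below) =====
def Claim_equal_split_stroke : Prop := ∀ (stroke : String), Dom_split_stroke stroke → Spec_split_stroke stroke (split_stroke stroke)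

-- ===== LEMMAS AND PROOFS =====

theorem join_nil : String.join [] = "" := rfl

theorem spanMiddleB_eq (ks : List String) :
    spanMiddleB ks = (ks.takeWhile (· ∈ middlesA), ks.dropWhile (· ∈ middlesA)) := by
  induction ks with
  | nil => simp [spanMiddleB]
  | cons k ks ih =>
    by_cases h : k ∈ middlesA
    · simp [spanMiddleB, h, ih]
    · simp [spanMiddleB, h]

theorem fold_from_right (ks : List String) : ∀ l m r,
    ks.foldl stepA (.right, l, m, r) = (.right, l, m, r ++ ks) := by
  induction ks with
  | nil => intro l m r; simp
  | cons k ks ih =>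
    intro l m r
    simp only [List.foldl_cons, stepA]
    simpa using ih l m (r ++ [k])

theorem fold_from_middle (ks : List String) : ∀ l m r,
    (ks.foldl stepA (.middle, l, m, r)).2 =
      (l, m ++ ks.takeWhile (· ∈ middlesA), r ++ ks.dropWhile (· ∈ middlesA)) := by
  induction ks with
  | nil => intro l m r; simp
  | cons k ks ih =>
    intro l m r
    by_cases h : k ∈ middlesA
    · simp only [List.foldl_cons, stepA, h]
      simpa [h] using ih l (m ++ [k]) r
    · simp only [List.foldl_cons, stepA, h]
      simp [h, fold_from_right]

theorem key_lemma (ks : List String) : ∀ l,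
    (let st := ks.foldl stepA (.left, l, [], []);
     let r' := if st.2.2.1.length = 0 ∧ st.2.2.2.length > 0 then st.2.2.2.drop 1 else st.2.2.2;
     (String.join st.2.1, String.join st.2.2.1, String.join r')) =
    (let p := splitLeftB ks;
     match p.2 with
     | [] => (String.join (l ++ p.1), "", "")
     | k :: rest =>
       if k = "-" then (String.join (l ++ p.1), "", String.join rest)
       else
         let q := spanMiddleB (k :: rest)
         (String.join (l ++ p.1), String.join q.1, String.join q.2)) := by
  induction ks with
  | nil => intro l; simp [splitLeftB, join_nil]
  | cons k ks ih =>
    intro l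
    by_cases hdash : k = "-"
    · subst hdash
      have hmem : ("-" : String) ∉ middlesA := by decide
      simp only [List.foldl_cons, stepA, splitLeftB]
      simp [hmem, fold_from_right, join_nil]
    · by_cases hmid : k ∈ middlesA
      · simp only [List.foldl_cons, stepA, splitLeftB]
        simp only [hdash, hmid, if_true, if_false, or_true, not_true]
        simp [hmid, fold_from_middle, spanMiddleB_eq]
      · simp only [List.foldl_cons, stepA, splitLeftB]
        simp only [hdash, hmid, or_self, if_false]
        have := ih (l ++ [k])
        simp only [List.append_assoc, List.singleton_append] at this
        simpa using this

-- ===== VERDICT (by name: the statement is the Claim_ definition above) =====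
theorem split_stroke_spec : Claim_equal_split_stroke := by
  intro stroke _
  unfold Spec_split_stroke split_stroke split_stroke_alt
  simpa using key_lemma (strokeToKeys stroke.toList) []
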